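-- pv_equiv track=rewrite | github.com/bcoit/Phys202-S13 | Project/ASEP.py | g_for_ASEP
-- ===== SOURCE A (Python) =====
-- def g_for_ASEP(x, v, i, road):
--     """Takes x, v, and road arrays as well as a randomly generated integer, i, as
-- arguments.  This function determines the empty spaces in front of a randomly
-- chosen car in order to be used in the ASEP traffic mode, returning a single g
-- value"""
--     L = len(road)
--     a = x[i]
--     b = 0
--     sortedx = sorted(x)
--     for j in range(0, len(sortedx)):
--         if sortedx[j] == a:
--             if j <= len(sortedx)-2: #finding g for all but the last car
--                 b = sortedx[j+1]
--                 gi = b - a - 1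
--             else:
--                 gi = L + sortedx[0] - sortedx[-1] - 1 #calculating g for the last car on the road
--     return gi
-- ===== SOURCE B (Python) =====
-- def g_for_ASEP(x, v, i, road):
--     """Gap to the next car ahead on a circular road of length len(road):
-- one linear pass instead of sorting."""
--     a = x[i]
--     nxt = min((val for val in x if val > a), default=None)
--     if nxt is not None:
--         return nxt - a - 1
--     return len(road) + min(x) - max(x) - 1
-- ===== Notes on version B (the rewrite author's own statement) =====
-- stated objective: faster
-- what changed: Instead of sorting x and scanning the sorted array for the chosen position, B takes the minimum of the values strictly greater than x[i] in one pass (falling back to len(road)+min(x)-max(x)-1 for the wrap-around case).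
import Mathlib
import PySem

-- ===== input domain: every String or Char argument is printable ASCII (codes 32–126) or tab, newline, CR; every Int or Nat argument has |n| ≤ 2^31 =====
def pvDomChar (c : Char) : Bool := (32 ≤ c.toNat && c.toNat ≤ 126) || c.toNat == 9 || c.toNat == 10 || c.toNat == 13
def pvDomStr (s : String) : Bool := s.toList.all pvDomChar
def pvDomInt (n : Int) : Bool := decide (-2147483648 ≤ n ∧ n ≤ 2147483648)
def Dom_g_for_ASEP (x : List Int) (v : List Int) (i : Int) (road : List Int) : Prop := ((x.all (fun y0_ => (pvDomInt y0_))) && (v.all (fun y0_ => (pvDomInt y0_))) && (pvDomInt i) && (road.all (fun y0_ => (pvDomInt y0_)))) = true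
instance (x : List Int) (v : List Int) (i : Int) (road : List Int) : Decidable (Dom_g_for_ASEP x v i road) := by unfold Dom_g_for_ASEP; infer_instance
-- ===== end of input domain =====

-- B replaces A's sort-then-scan by a single min over the values greater than x[i] (O(n) vs O(n log n)).

-- ===== PORT A =====
-- literal transliteration of A: sort x, scan every index j, overwrite (b, gi) at each match of a
def g_for_ASEP (x : List Int) (v : List Int) (i : Int) (road : List Int) : Int :=
  let L : Int := road.length
  let a : Int := PySem.List.pyGetD x i 0
  let sortedx := PySem.List.sorted x (fun y => y) false
  ((PySem.List.pyRange 0 (sortedx.length : Int) 1).foldl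
    (fun (s : Int × Int) j =>
      if PySem.List.pyGetD sortedx j 0 = a then
        if j ≤ (sortedx.length : Int) - 2 then
          let b := PySem.List.pyGetD sortedx (j + 1) 0
          (b, b - a - 1)
        else
          (s.1, L + PySem.List.pyGetD sortedx 0 0 - PySem.List.pyGetD sortedx (-1) 0 - 1)
      else s)
    (0, 0)).2

-- ===== PORT B =====
-- transliteration of Source B: min of the values > a, else wrap-around via min/max
def g_for_ASEP_alt (x : List Int) (v : List Int) (i : Int) (road : List Int) : Int :=
  let a : Int := PySem.List.pyGetD x i 0
  match PySem.List.min? (x.filter (fun val => decide (a < val))) (fun y => y) with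
  | some nxt => nxt - a - 1
  | none => (road.length : Int) + ((PySem.List.min? x (fun y => y)).getD 0) - ((PySem.List.max? x (fun y => y)).getD 0) - 1

-- ===== PRECONDITION & SPEC =====
-- Pre: x[i] must not raise IndexError (in particular x ≠ []); A raises outside this.
def Pre_g_for_ASEP (x : List Int) (v : List Int) (i : Int) (road : List Int) : Prop :=
  PySem.Raise.InRange x.length i
instance (x : List Int) (v : List Int) (i : Int) (road : List Int) : Decidable (Pre_g_for_ASEP x v i road) := by unfold Pre_g_for_ASEP; infer_instance

def pvWitness_g_for_ASEP : List Int × List Int × Int × List Int := ([3, 7, 1], [0, 0, 0], 1, [0, 0, 0, 0, 0, 0, 0, 0, 0, 0])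

def Spec_g_for_ASEP (x : List Int) (v : List Int) (i : Int) (road : List Int) (out : Int) : Prop := out = g_for_ASEP_alt x v i road
instance (x : List Int) (v : List Int) (i : Int) (road : List Int) (out : Int) : Decidable (Spec_g_for_ASEP x v i road out) := by unfold Spec_g_for_ASEP; infer_instance

-- ===== CLAIM (what is proved, stated in full; the proofs are below) =====
def Claim_equal_g_for_ASEP : Prop := ∀ (x : List Int) (v : List Int) (i : Int) (road : List Int), Dom_g_for_ASEP x v i road → Pre_g_for_ASEP x v i road → Spec_g_for_ASEP x v i road (g_for_ASEP x v i road)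

-- ===== LEMMAS AND PROOFS =====

-- split a list at the LAST occurrence of a member
theorem pv_exists_last_split {a : Int} : ∀ {l : List Int}, a ∈ l → ∃ p q, l = p ++ a :: q ∧ a ∉ q := by
  intro l hl
  induction l with
  | nil => cases hl
  | cons h t ih =>
    by_cases ht : a ∈ t
    · obtain ⟨p, q, rfl, hq⟩ := ih ht
      exact ⟨h :: p, q, rfl, hq⟩
    · rcases List.mem_cons.1 hl with rfl | h'
      · exact ⟨[], t, rfl, ht⟩
      · exact absurd h' ht

-- a fold whose body never fires keeps its accumulator
theorem pv_foldl_id {σ : Type} (f : σ → Int → σ) :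
    ∀ (l : List Int) (init : σ), (∀ s j, j ∈ l → f s j = s) → l.foldl f init = init := by
  intro l
  induction l with
  | nil => intro init _; rfl
  | cons h t ih =>
    intro init hf
    simp only [List.foldl_cons, hf init h (List.mem_cons_self)]
    exact ih init (fun s j hj => hf s j (List.mem_cons_of_mem _ hj))

theorem pv_min?_eq_of {l : List Int} {m : Int} (hm : m ∈ l) (hle : ∀ z ∈ l, m ≤ z) :
    PySem.List.min? l (fun y => y) = some m := by
  cases h : PySem.List.min? l (fun y => y) with
  | none =>
    rw [PySem.List.min?_eq_none_iff] at h
    subst h; cases hm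
  | some m' =>
    have h1 := PySem.List.min?_mem h
    have h2 := PySem.List.min?_isMin h
    exact congrArg some (le_antisymm (h2 m hm) (hle m' h1))

theorem pv_max?_eq_of {l : List Int} {m : Int} (hm : m ∈ l) (hle : ∀ z ∈ l, z ≤ m) :
    PySem.List.max? l (fun y => y) = some m := by
  cases h : PySem.List.max? l (fun y => y) with
  | none =>
    rw [PySem.List.max?_eq_none_iff] at h
    subst h; cases hm
  | some m' =>
    have h1 := PySem.List.max?_mem h
    have h2 := PySem.List.max?_isMax h
    exact congrArg some (le_antisymm (hle m' h1) (h2 m hm))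

-- an element of s strictly after the split point lies in q
theorem pv_mem_q {p q : List Int} {a : Int} {j : Nat} (h1 : p.length + 1 ≤ j)
    (h2 : j < (p ++ a :: q).length) : (p ++ a :: q)[j] ∈ q := by
  have hlen : j - p.length - 1 < q.length := by simp at h2; omega
  have h3 : (p ++ a :: q)[j]? = q[j - p.length - 1]? := by
    rw [List.getElem?_append_right (by omega)]
    rcases hk : j - p.length with _ | k
    · omega
    · simp [hk]
  have h4 : (p ++ a :: q)[j]? = some ((p ++ a :: q)[j]) := List.getElem?_eq_getElem h2
  exact List.mem_of_getElem? (h3.symm.trans h4)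

-- ===== VERDICT (by name: the statement is the Claim_ definition above) =====
theorem g_for_ASEP_spec : Claim_equal_g_for_ASEP := by
  intro x v i road _ hpre
  unfold Spec_g_for_ASEP g_for_ASEP g_for_ASEP_alt
  simp only []
  set a := PySem.List.pyGetD x i 0 with ha_def
  have hax : a ∈ x := PySem.List.pyGetD_mem x 0 hpre
  set s := PySem.List.sorted x (fun y => y) false with hs_def
  have hperm : s.Perm x := PySem.List.sorted_perm x (fun y => y) false
  have hpair : s.Pairwise (fun u w : Int => u ≤ w) := PySem.List.sorted_pairwise x (fun y => y)
  have has : a ∈ s := (PySem.List.mem_sorted x (fun y => y) false a).2 hax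
  obtain ⟨p, q, hsplit, haq⟩ := pv_exists_last_split has
  have hpall : (p ++ a :: q).Pairwise (fun u w : Int => u ≤ w) := hsplit ▸ hpair
  have hpermpq : (p ++ a :: q).Perm x := hsplit ▸ hperm
  have hcross : ∀ u ∈ p, ∀ w ∈ (a :: q), u ≤ w := (List.pairwise_append.1 hpall).2.2
  have hcq : (a :: q).Pairwise (fun u w : Int => u ≤ w) := (List.pairwise_append.1 hpall).2.1
  have hq : ∀ w ∈ q, a < w := fun w hw =>
    lt_of_le_of_ne (List.rel_of_pairwise_cons hcq hw) (fun he => haq (he ▸ hw))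
  have hp : ∀ u ∈ p, u ≤ a := fun u hu => hcross u hu a List.mem_cons_self
  rw [hsplit]
  have hnlen : (p ++ a :: q).length = p.length + 1 + q.length := by simp; omega
  have hsplitrange : PySem.List.pyRange 0 ((p ++ a :: q).length : Int) 1 =
      PySem.List.pyRange 0 (p.length : Int) 1 ++ (p.length : Int) ::
        PySem.List.pyRange ((p.length : Int) + 1) ((p ++ a :: q).length : Int) 1 := by
    rw [PySem.List.pyRange_one_append 0 (p.length : Int) ((p ++ a :: q).length : Int)
      (by positivity) (by omega)]
    congr 1
    exact PySem.List.pyRange_one_cons (by omega)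
  rw [hsplitrange, List.foldl_append, List.foldl_cons]
  have hgm : PySem.List.pyGetD (p ++ a :: q) ((p.length : Nat) : Int) 0 = a := by
    rw [PySem.List.pyGetD_natCast]
    simp [List.getD]
  rw [if_pos hgm]
  cases q with
  | cons c q' =>
    rw [if_pos (show ((p.length : Nat) : Int) ≤ ((p ++ a :: c :: q').length : Int) - 2 by
      simp; omega)]
    have hget1 : PySem.List.pyGetD (p ++ a :: c :: q') ((p.length : Int) + 1) 0 = c := by
      have hc : ((p.length : Int) + 1) = ((p.length + 1 : Nat) : Int) := by push_cast; ring
      rw [hc, PySem.List.pyGetD_natCast]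
      simp [List.getD]
    rw [hget1]
    rw [pv_foldl_id _ _ _ ?_]
    · -- (c, c - a - 1).2 = B
      have hminf : PySem.List.min? (List.filter (fun val => decide (a < val)) x) (fun y => y)
          = some c := by
        apply pv_min?_eq_of
        · exact List.mem_filter.2 ⟨hpermpq.subset (by simp), by simp [hq c (by simp)]⟩
        · intro z hz
          obtain ⟨hzx, hza⟩ := List.mem_filter.1 hz
          have hza' : a < z := by simpa using hza
          have hzs : z ∈ p ++ a :: c :: q' := hpermpq.mem_iff.2 hzx
          rcases List.mem_append.1 hzs with hzp | hzaq
          · exact absurd hza' (not_lt.2 (hp z hzp))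
          · rcases List.mem_cons.1 hzaq with rfl | hzcq
            · exact absurd hza' (lt_irrefl _)
            · rcases List.mem_cons.1 hzcq with rfl | hzq'
              · exact le_refl _
              · exact List.rel_of_pairwise_cons (List.pairwise_cons.1 hcq).2 hzq'
      rw [hminf]
    · -- suffix never fires
      intro st j hj
      rw [PySem.List.mem_pyRange_one] at hj
      have hjn : j.toNat < (p ++ a :: c :: q').length := by simp at hj ⊢; omega
      have hjget : PySem.List.pyGetD (p ++ a :: c :: q') j 0 = (p ++ a :: c :: q')[j.toNat] :=
        PySem.List.pyGetD_eq_getElem _ _ (by omega) (by exact_mod_cast hj.2)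
      have hmemq : (p ++ a :: c :: q')[j.toNat] ∈ c :: q' := pv_mem_q (by omega) hjn
      rw [if_neg]
      rw [hjget]
      exact fun he => absurd (hq _ hmemq) (by rw [he]; exact lt_irrefl a)
  | nil =>
    rw [if_neg (show ¬ ((p.length : Nat) : Int) ≤ ((p ++ a :: ([]:List Int)).length : Int) - 2 by
      simp; omega)]
    have hempty : PySem.List.pyRange ((p.length : Int) + 1) ((p ++ a :: ([]:List Int)).length : Int) 1 = [] := by
      apply List.eq_nil_of_length_eq_zero
      rw [PySem.List.length_pyRange_one]
      simp
    rw [hempty, List.foldl_nil]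
    have hlast : PySem.List.pyGetD (p ++ [a]) (-1) 0 = a :=
      PySem.List.pyGetD_neg_one_append_singleton _ _ _
    rw [hlast]
    have hfilt : List.filter (fun val => decide (a < val)) x = [] := by
      rw [List.filter_eq_nil_iff]
      intro z hzx
      have hzs : z ∈ p ++ [a] := hpermpq.mem_iff.2 hzx
      rcases List.mem_append.1 hzs with hzp | hza
      · simpa using not_lt.2 (hp z hzp)
      · simp at hza; simp [hza]
    rw [hfilt]
    have hmax : PySem.List.max? x (fun y => y) = some a := by
      apply pv_max?_eq_of
      · exact hpermpq.subset (by simp)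
      · intro z hzx
        rcases List.mem_append.1 (hpermpq.mem_iff.2 hzx) with hzp | hza
        · exact hp z hzp
        · simp at hza; omega
    cases p with
    | nil =>
      have hmin : PySem.List.min? x (fun y => y) = some a := by
        apply pv_min?_eq_of
        · exact hpermpq.subset (by simp)
        · intro z hzx
          have := hpermpq.mem_iff.2 hzx
          simp at this; omega
      have hget0 : PySem.List.pyGetD (([]:List Int) ++ [a]) 0 0 = a := by
        rw [List.nil_append]
        exact PySem.List.pyGetD_zero_cons _ _ _
      rw [hget0, hmin, hmax]
      rfl
    | cons ph pt =>
      have hph : ∀ z ∈ x, ph ≤ z := by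
        intro z hzx
        have hzs : z ∈ (ph :: pt) ++ [a] := hpermpq.mem_iff.2 hzx
        rw [List.cons_append] at hzs
        rcases List.mem_cons.1 hzs with rfl | hzt
        · exact le_refl _
        · exact List.rel_of_pairwise_cons (by rw [List.cons_append] at hpall; exact hpall) hzt
      have hmin : PySem.List.min? x (fun y => y) = some ph := by
        apply pv_min?_eq_of
        · exact hpermpq.subset (by simp)
        · exact hph
      have hget0 : PySem.List.pyGetD ((ph :: pt) ++ [a]) 0 0 = ph := by
        rw [List.cons_append]
        exact PySem.List.pyGetD_zero_cons _ _ _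
      rw [hget0, hmin, hmax]
      rfl
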